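-- pv_equiv track=rewrite | github.com/Dharshinisri2005/automataexam | q9.py | is_accepted_by_pda
-- ===== SOURCE A (Python) =====
-- def is_accepted_by_pda(string):
--     stack = []
--     found_C = False
--     index = 0
--
--     while index < len(string):
--         char = string[index]
--
--         if not found_C:
--             if char == 'C':
--                 found_C = True
--             else:
--                 stack.append(char)
--         else:
--             if not stack or stack.pop() != char:
--                 return False
--
--         index += 1
--
--     return len(stack) == 0 and found_C
-- ===== SOURCE B (Python) =====
-- def is_accepted_by_pda(string):
--     i = string.find('C')
--     if i == -1:
--         return False
--     return string[:i][::-1] == string[i+1:]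
-- ===== Notes on version B (the rewrite author's own statement) =====
-- stated objective: simpler
-- what changed: Replaces the PDA stack simulation (per-char push/pop loop with a found_C flag) by a direct split at the first 'C' and a reversed-prefix-equals-suffix slice comparison.
import Mathlib
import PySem

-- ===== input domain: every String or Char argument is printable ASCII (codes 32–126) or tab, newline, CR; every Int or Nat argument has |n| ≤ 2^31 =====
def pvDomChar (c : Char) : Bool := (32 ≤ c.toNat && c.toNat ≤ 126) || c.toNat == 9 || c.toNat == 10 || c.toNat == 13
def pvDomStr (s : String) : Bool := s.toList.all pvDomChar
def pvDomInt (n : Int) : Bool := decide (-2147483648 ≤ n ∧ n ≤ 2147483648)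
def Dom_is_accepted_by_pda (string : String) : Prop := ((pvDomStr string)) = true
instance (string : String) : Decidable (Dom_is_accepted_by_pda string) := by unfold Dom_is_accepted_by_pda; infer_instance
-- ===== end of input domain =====

-- B replaces A's PDA stack simulation by split-at-first-'C' and a reversed-prefix = suffix comparison (simpler; same O(n) cost).

-- ===== PORT A =====
-- the while loop of A: state = (stack, remaining characters, found_C); push = cons (top of stack at head)
def pdaLoop : List Char → List Char → Bool → Bool
  | stack, [], found => stack.isEmpty && found
  | stack, c :: rest, found =>
    if found = false then
      if c = 'C' then pdaLoop stack rest true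
      else pdaLoop (c :: stack) rest found
    else
      match stack with
      | [] => false
      | t :: ts => if t ≠ c then false else pdaLoop ts rest found

def is_accepted_by_pda (string : String) : Bool :=
  pdaLoop [] string.toList false

-- ===== PORT B =====
def is_accepted_by_pda_alt (string : String) : Bool :=
  let i := PySem.Str.find string "C"
  if i == -1 then false
  else
    -- string[:i][::-1] == string[i+1:]  (slice? with step -1 is always some)
    ((PySem.Str.slice? (PySem.Str.slice string none (some i)) none none (-1)).getD "")
      == PySem.Str.slice string (some (i + 1)) none

-- ===== PRECONDITION & SPEC =====
def Spec_is_accepted_by_pda (string : String) (out : Bool) : Prop := out = is_accepted_by_pda_alt string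
instance (string : String) (out : Bool) : Decidable (Spec_is_accepted_by_pda string out) := by unfold Spec_is_accepted_by_pda; infer_instance

-- ===== CLAIM (what is proved, stated in full; the proofs are below) =====
def Claim_equal_is_accepted_by_pda : Prop := ∀ (string : String), Dom_is_accepted_by_pda string → Spec_is_accepted_by_pda string (is_accepted_by_pda string)

-- ===== LEMMAS AND PROOFS =====

theorem pdaLoop_found (cs : List Char) : ∀ stack : List Char, pdaLoop stack cs true = (stack == cs) := by
  induction cs with
  | nil => intro stack; cases stack <;> simp [pdaLoop]
  | cons c cs ih =>
    intro stack
    cases stack with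
    | nil => simp [pdaLoop]
    | cons t ts =>
      by_cases h : t = c <;> simp [pdaLoop, h, ih]

theorem pdaLoop_noC (cs : List Char) : ∀ stack : List Char, 'C' ∉ cs → pdaLoop stack cs false = false := by
  induction cs with
  | nil => intro stack _; simp [pdaLoop]
  | cons c cs ih =>
    intro stack h
    have hc : c ≠ 'C' := fun hh => h (by simp [hh])
    have : 'C' ∉ cs := fun hh => h (by simp [hh])
    simp [pdaLoop, hc, ih _ this]

theorem pdaLoop_split (pre : List Char) : ∀ (stack suf : List Char), 'C' ∉ pre →
    pdaLoop stack (pre ++ 'C' :: suf) false = ((pre.reverse ++ stack) == suf) := by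
  induction pre with
  | nil => intro stack suf _; simp [pdaLoop, pdaLoop_found]
  | cons c pre ih =>
    intro stack suf h
    have hc : c ≠ 'C' := fun hh => h (by simp [hh])
    have h2 : 'C' ∉ pre := fun hh => h (by simp [hh])
    simp [pdaLoop, hc, ih _ _ h2]

-- [a] <+: l iff l starts with a
theorem singleton_prefix_iff (a : Char) (l : List Char) : ([a] <+: l) ↔ ∃ t, l = a :: t := by
  cases l with
  | nil => simp
  | cons b t =>
    constructor
    · intro h
      rcases h with ⟨u, hu⟩
      simp at hu
      exact ⟨t, by simp [hu.1]⟩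
    · rintro ⟨t', ht⟩
      rw [ht]
      exact ⟨t', rfl⟩

-- the first occurrence of 'C': find = pre.length
theorem findC_split (pre suf : List Char) (h : 'C' ∉ pre) :
    PySem.Chars.find (pre ++ 'C' :: suf) ['C'] = (pre.length : Int) := by
  set cs := pre ++ 'C' :: suf with hcs
  have hinf : ['C'] <:+: cs := ⟨pre, suf, by simp [hcs]⟩
  have h0 : 0 ≤ PySem.Chars.find cs ['C'] := (PySem.Chars.find_nonneg_iff _ _).mpr hinf
  obtain ⟨hpre, hmin⟩ := PySem.Chars.find_spec (s := cs) (sub := ['C']) h0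
  set n := (PySem.Chars.find cs ['C']).toNat with hn
  have hge : pre.length ≤ n := by
    by_contra hlt'
    have hlt : n < pre.length := by omega
    rcases (singleton_prefix_iff _ _).mp hpre with ⟨t, ht⟩
    have hdrop : cs.drop n = pre.drop n ++ 'C' :: suf := by
      simp [hcs, List.drop_append_of_le_length (le_of_lt hlt)]
    have hhead : (pre.drop n).head? = some 'C' := by
      have hne : pre.drop n ≠ [] := by
        intro hnil
        have := List.drop_eq_nil_iff.mp hnil
        omega
      cases hd : pre.drop n with
      | nil => exact absurd hd hne
      | cons x xs =>
        have : cs.drop n = x :: (xs ++ 'C' :: suf) := by simp [hdrop, hd]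
        rw [this] at ht
        simp at ht
        simp [ht.1]
    rcases List.head?_eq_some_iff.mp hhead with ⟨xs, hx⟩
    have : 'C' ∈ pre := by
      have := List.drop_subset n pre
      exact this (by rw [hx]; exact List.mem_cons_self ..)
    exact h this
  have hle : n ≤ pre.length := by
    by_contra hlt'
    have hlt : pre.length < n := by omega
    exact hmin pre.length hlt ((singleton_prefix_iff _ _).mpr ⟨suf, by simp [hcs]⟩)
  have : n = pre.length := le_antisymm hle hge
  omega

theorem string_beq_toList (s t : String) : (s == t) = (s.toList == t.toList) := by
  by_cases h : s = t
  · simp [h]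
  · have : s.toList ≠ t.toList := fun hh => h (by
      have := congrArg String.ofList hh
      simpa using this)
    simp [h, this]

-- first-occurrence split of a list containing c
theorem exists_first_split (c : Char) (l : List Char) (h : c ∈ l) :
    ∃ pre suf, l = pre ++ c :: suf ∧ c ∉ pre := by
  induction l with
  | nil => simp at h
  | cons a l ih =>
    by_cases hac : a = c
    · exact ⟨[], l, by simp [hac], by simp⟩
    · have : c ∈ l := by
        rcases List.mem_cons.mp h with h1 | h1
        · exact absurd h1.symm hac
        · exact h1
      rcases ih this with ⟨pre, suf, h1, h2⟩
      exact ⟨a :: pre, suf, by simp [h1], by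
        intro hm
        rcases List.mem_cons.mp hm with h3 | h3
        · exact hac h3.symm
        · exact h2 h3⟩

theorem singleton_infix_iff (a : Char) (l : List Char) : ([a] <:+: l) ↔ a ∈ l := by
  constructor
  · rintro ⟨s, t, hst⟩
    rw [← hst]; simp
  · intro h
    rcases exists_first_split a l h with ⟨pre, suf, h1, _⟩
    exact ⟨pre, suf, by simp [h1]⟩

-- ===== VERDICT (by name: the statement is the Claim_ definition above) =====
theorem is_accepted_by_pda_spec : Claim_equal_is_accepted_by_pda := by
  intro string _
  unfold Spec_is_accepted_by_pda is_accepted_by_pda is_accepted_by_pda_alt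
  set cs := string.toList with hcs
  by_cases hmem : 'C' ∈ cs
  · rcases exists_first_split 'C' cs hmem with ⟨pre, suf, hsplit, hpre⟩
    have hfind : PySem.Str.find string "C" = (pre.length : Int) := by
      have : PySem.Str.find string "C" = PySem.Chars.find cs ['C'] := by
        simp [← hcs]
      rw [this, hsplit, findC_split pre suf hpre]
    rw [hfind]
    have hne : ((pre.length : Int) == -1) = false := by simp
    simp only [hne, Bool.false_eq_true, if_false]
    -- prefix slice
    have hprefix : (PySem.Str.slice string none (some (pre.length : Int))).toList = pre := by
      rw [PySem.Str.toList_slice, ← hcs, PySem.Chars.slice_eq_listSlice,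
        PySem.List.slice_to_natCast, hsplit]
      simp
    -- suffix slice
    have hsuffix : (PySem.Str.slice string (some ((pre.length : Int) + 1)) none).toList = suf := by
      have : (pre.length : Int) + 1 = ((pre.length + 1 : Nat) : Int) := by push_cast; ring
      rw [this, PySem.Str.toList_slice, ← hcs, PySem.Chars.slice_eq_listSlice,
        PySem.List.slice_from_natCast, hsplit]
      simp
    rw [hsplit, pdaLoop_split pre [] suf hpre]
    rw [PySem.Str.slice?_none_none_neg_one, Option.getD_some]
    rw [string_beq_toList]
    simp [hprefix, hsuffix]
  · have hfind : PySem.Str.find string "C" = -1 := by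
      have : PySem.Str.find string "C" = PySem.Chars.find cs ['C'] := by
        simp [← hcs]
      rw [this]
      exact (PySem.Chars.find_eq_neg_one_iff _ _).mpr
        (fun hinf => hmem ((singleton_infix_iff _ _).mp hinf))
    rw [hfind]
    simp [pdaLoop_noC cs [] hmem]
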